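-- pv_equiv track=rewrite | github.com/XsedoX/CryptographyAndBasicsOfCryptanalysis | Labs/sbox_calculations.py | calculate_xor_profile
-- ===== SOURCE A (Python) =====
-- import itertools
--
-- def get_nth_bit(int_num, n):
--     return (int_num >> n) & 1
--
-- def calculate_xor(num1, num2, amount_of_arguments):
--     result = 0
--     for i in range(amount_of_arguments):
--         xored_bit = get_nth_bit(num1, i) ^ get_nth_bit(num2, i)
--         result += xored_bit * (2**i)
--
--     return result
--
-- def calculate_xor_profile(amount_of_arguments, values_from_sbox):
--     possible_outputs = [[0 for i in range(2**amount_of_arguments)] for j in range(2**amount_of_arguments)]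
--     possible_values = [i for i in range(2**amount_of_arguments)]
--     combinations = list(itertools.combinations(possible_values, 2))
--     for combination in combinations:
--         x1 = combination[0]
--         x2 = combination[1]
--         y1 = values_from_sbox[x1]
--         y2 = values_from_sbox[x2]
--         sum_x1_x2 = calculate_xor(x1, x2, amount_of_arguments)
--         sum_y1_y2 = calculate_xor(y1, y2, amount_of_arguments)
--         possible_outputs[sum_x1_x2][sum_y1_y2] += 2
--
--     return max(map(max, possible_outputs))
-- ===== SOURCE B (Python) =====
-- def calculate_xor_profile(amount_of_arguments, values_from_sbox):
--     size = 2 ** amount_of_arguments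
--     mask = size - 1
--     table = [[0] * size for _ in range(size)]
--     for dx in range(1, size):
--         for x in range(size):
--             dy = (values_from_sbox[x] ^ values_from_sbox[x ^ dx]) & mask
--             table[dx][dy] += 1
--     return max(map(max, table))
-- ===== Notes on version B (the rewrite author's own statement) =====
-- stated objective: alternative
-- what changed: Instead of enumerating all unordered pairs and recomputing XOR bit by bit with the helper, B iterates over nonzero input differences dx and points x and tallies table[dx][(s[x]^s[x^dx])&mask] with native XOR (each unordered pair is hit twice, matching A's +2), then takes the same max.
import Mathlib
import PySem

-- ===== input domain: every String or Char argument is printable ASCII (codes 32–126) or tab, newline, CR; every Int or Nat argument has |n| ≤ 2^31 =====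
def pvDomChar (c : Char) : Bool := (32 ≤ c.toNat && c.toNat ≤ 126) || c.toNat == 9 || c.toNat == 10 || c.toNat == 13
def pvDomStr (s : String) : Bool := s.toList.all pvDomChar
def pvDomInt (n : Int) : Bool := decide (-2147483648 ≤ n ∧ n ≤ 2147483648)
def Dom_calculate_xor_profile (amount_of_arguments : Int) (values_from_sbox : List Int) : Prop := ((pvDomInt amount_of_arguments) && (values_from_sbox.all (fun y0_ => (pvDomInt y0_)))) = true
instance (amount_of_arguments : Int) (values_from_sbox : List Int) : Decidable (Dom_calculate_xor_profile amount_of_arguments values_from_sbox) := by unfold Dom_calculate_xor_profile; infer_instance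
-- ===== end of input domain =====

-- B replaces A's unordered-pair enumeration and per-bit XOR helper by a sweep over nonzero
-- input differences dx (each pair counted twice, as (dx,x) and (dx,x^dx)) with native XOR and
-- a bitmask: an alternative algorithm for the same difference-distribution-table maximum.


-- ===== PORT A =====
def pvGetNthBit (int_num n : Int) : Int := PySem.Int.band (int_num >>> n.toNat) 1

def pvCalculateXor (num1 num2 amount_of_arguments : Int) : Int :=
  (PySem.List.pyRange 0 amount_of_arguments 1).foldl
    (fun result i =>
      result + PySem.Int.bxor (pvGetNthBit num1 i) (pvGetNthBit num2 i) * 2 ^ i.toNat) 0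

def calculate_xor_profile (amount_of_arguments : Int) (values_from_sbox : List Int) : Int :=
  let size : Int := 2 ^ amount_of_arguments.toNat
  let possible_outputs : List (List Int) :=
    (PySem.List.pyRange 0 size 1).map (fun _ => (PySem.List.pyRange 0 size 1).map (fun _ => (0:Int)))
  let possible_values := PySem.List.pyRange 0 size 1
  let combinations := PySem.List.combinations possible_values 2
  let table := combinations.foldl (fun t combination =>
      let x1 := (PySem.List.pyGet? combination 0).getD 0
      let x2 := (PySem.List.pyGet? combination 1).getD 0
      let y1 := (PySem.List.pyGet? values_from_sbox x1).getD 0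
      let y2 := (PySem.List.pyGet? values_from_sbox x2).getD 0
      let sum_x1_x2 := pvCalculateXor x1 x2 amount_of_arguments
      let sum_y1_y2 := pvCalculateXor y1 y2 amount_of_arguments
      t.modify sum_x1_x2.toNat (fun row => row.modify sum_y1_y2.toNat (· + 2))) possible_outputs
  (PySem.List.max? (table.map (fun row => (PySem.List.max? row (fun v => v)).getD 0)) (fun v => v)).getD 0

-- ===== PORT B =====
def calculate_xor_profile_alt (amount_of_arguments : Int) (values_from_sbox : List Int) : Int :=
  let size : Int := 2 ^ amount_of_arguments.toNat
  let mask : Int := size - 1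
  let table0 : List (List Int) :=
    (PySem.List.pyRange 0 size 1).map (fun _ => PySem.List.pyRepeat [(0:Int)] size)
  let table := (PySem.List.pyRange 1 size 1).foldl (fun t dx =>
      (PySem.List.pyRange 0 size 1).foldl (fun t x =>
        let dy := PySem.Int.band
          (PySem.Int.bxor ((PySem.List.pyGet? values_from_sbox x).getD 0)
            ((PySem.List.pyGet? values_from_sbox (PySem.Int.bxor x dx)).getD 0)) mask
        t.modify dx.toNat (fun row => row.modify dy.toNat (· + 1))) t) table0
  (PySem.List.max? (table.map (fun row => (PySem.List.max? row (fun v => v)).getD 0)) (fun v => v)).getD 0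

-- ===== PRECONDITION & SPEC =====
-- Pre_ excludes exactly the inputs where Python A raises: a negative amount (range(2**n) is a
-- TypeError on a float) and a value list shorter than 2**n with n > 0 (IndexError); nothing else.
def Pre_calculate_xor_profile (amount_of_arguments : Int) (values_from_sbox : List Int) : Prop :=
  0 ≤ amount_of_arguments ∧
    (amount_of_arguments = 0 ∨ (2:Int) ^ amount_of_arguments.toNat ≤ values_from_sbox.length)
instance (amount_of_arguments : Int) (values_from_sbox : List Int) : Decidable (Pre_calculate_xor_profile amount_of_arguments values_from_sbox) := by unfold Pre_calculate_xor_profile; infer_instance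

def pvWitness_calculate_xor_profile : Int × List Int := (2, [1, -7, 3, 0])

def Spec_calculate_xor_profile (amount_of_arguments : Int) (values_from_sbox : List Int) (out : Int) : Prop := out = calculate_xor_profile_alt amount_of_arguments values_from_sbox
instance (amount_of_arguments : Int) (values_from_sbox : List Int) (out : Int) : Decidable (Spec_calculate_xor_profile amount_of_arguments values_from_sbox out) := by unfold Spec_calculate_xor_profile; infer_instance

-- ===== CLAIM (what is proved, stated in full; the proofs are below) =====
def Claim_equal_calculate_xor_profile : Prop := ∀ (amount_of_arguments : Int) (values_from_sbox : List Int), Dom_calculate_xor_profile amount_of_arguments values_from_sbox → Pre_calculate_xor_profile amount_of_arguments values_from_sbox → Spec_calculate_xor_profile amount_of_arguments values_from_sbox (calculate_xor_profile amount_of_arguments values_from_sbox)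

-- ===== LEMMAS AND PROOFS =====
def pvBit (a : Int) (i : Nat) : Int := (a / 2 ^ i) % 2
theorem pvBit_natCast (N : Nat) (i : Nat) : pvBit (N : Int) i = ((N >>> i) &&& 1 : Nat) := by
  unfold pvBit; rw [Nat.and_one_is_mod, Nat.shiftRight_eq_div_pow]; push_cast; rfl
theorem pv_shift_neg (a M : Int) (_ha : a < 0) (hM : 0 < M) : a / M = -((-a - 1) / M) - 1 := by
  have h1 := Int.ediv_add_emod (-a - 1) M
  have h2 := Int.emod_nonneg (-a - 1) (ne_of_gt hM)
  have h3 := Int.emod_lt_of_pos (-a - 1) hM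
  exact ((Int.ediv_emod_unique (a := a) (b := M) (q := -((-a - 1) / M) - 1)
      (r := M - 1 - (-a - 1) % M) hM).2 ⟨by linear_combination -h1, by omega, by omega⟩).1
theorem pvBit_neg (a : Int) (ha : a < 0) (i : Nat) :
    pvBit a i = 1 - pvBit ((-a - 1).toNat : Int) i := by
  unfold pvBit
  rw [Int.toNat_of_nonneg (by omega), pv_shift_neg a (2 ^ i) ha (by positivity)]
  have := Int.emod_two_eq ((-a - 1) / 2 ^ i)
  omega
theorem pvNat_bit_xor (X Y i : Nat) :
    ((X ^^^ Y) >>> i) &&& 1 = ((X >>> i) &&& 1) ^^^ ((Y >>> i) &&& 1) := by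
  have h : (X ^^^ Y) >>> i = (X >>> i) ^^^ (Y >>> i) := by
    apply Nat.eq_of_testBit_eq
    intro j
    simp [Nat.testBit_shiftRight, Nat.testBit_xor]
  rw [h, Nat.and_xor_distrib_right]
theorem pvNat_bit_le (X i : Nat) : (X >>> i) &&& 1 ≤ 1 := by
  rw [Nat.and_one_is_mod]; omega

theorem pvBit_xor_aux (a b : Int) (ha : 0 ≤ a) (hb : b < 0) (i : Nat) :
    PySem.Int.bxor (pvBit a i) (pvBit b i) = pvBit (PySem.Int.bxor a b) i := by
  have hx : PySem.Int.bxor a b = -((a.toNat ^^^ (-b - 1).toNat : Nat) : Int) - 1 := by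
    unfold PySem.Int.bxor
    rw [if_pos ha, if_neg (by omega)]
  have hxbit : pvBit (PySem.Int.bxor a b) i
      = 1 - (((a.toNat ^^^ (-b - 1).toNat) >>> i &&& 1 : Nat) : Int) := by
    rw [hx, pvBit_neg _ (by have : (0:Int) ≤ ((a.toNat ^^^ (-b - 1).toNat : Nat) : Int) := Int.natCast_nonneg _; omega)]
    rw [show (-(-((a.toNat ^^^ (-b - 1).toNat : Nat) : Int) - 1) - 1) = ((a.toNat ^^^ (-b - 1).toNat : Nat) : Int) by ring]
    rw [Int.toNat_natCast, pvBit_natCast]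
  have hxa : pvBit a i = ((a.toNat >>> i &&& 1 : Nat) : Int) := by
    conv_lhs => rw [show a = ((a.toNat : Int)) from (Int.toNat_of_nonneg ha).symm]
    rw [pvBit_natCast]
  have hxb : pvBit b i = 1 - (((-b - 1).toNat >>> i &&& 1 : Nat) : Int) := by
    rw [pvBit_neg b hb, pvBit_natCast]
  rw [hxa, hxb, hxbit, pvNat_bit_xor]
  have h1 := pvNat_bit_le a.toNat i
  have h2 := pvNat_bit_le (-b - 1).toNat i
  set nA := (a.toNat >>> i) &&& 1 with hnA
  set nB := ((-b - 1).toNat >>> i) &&& 1 with hnB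
  interval_cases nA <;> interval_cases nB <;> decide

theorem pvBit_xor (a b : Int) (i : Nat) :
    PySem.Int.bxor (pvBit a i) (pvBit b i) = pvBit (PySem.Int.bxor a b) i := by
  by_cases ha : 0 ≤ a <;> by_cases hb : 0 ≤ b
  · rw [show a = ((a.toNat : Int)) from (Int.toNat_of_nonneg ha).symm,
        show b = ((b.toNat : Int)) from (Int.toNat_of_nonneg hb).symm]
    rw [PySem.Int.bxor_natCast a.toNat b.toNat, pvBit_natCast, pvBit_natCast, pvBit_natCast, pvNat_bit_xor]
    exact PySem.Int.bxor_natCast _ _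
  · exact pvBit_xor_aux a b ha (by omega) i
  · rw [PySem.Int.bxor_comm a b, PySem.Int.bxor_comm (pvBit a i) (pvBit b i)]
    exact pvBit_xor_aux b a hb (by omega) i
  · have hx : PySem.Int.bxor a b = (((-a - 1).toNat ^^^ (-b - 1).toNat : Nat) : Int) := by
      unfold PySem.Int.bxor
      rw [if_neg ha, if_neg hb]
    rw [pvBit_neg a (by omega), pvBit_neg b (by omega), hx, pvBit_natCast, pvBit_natCast,
      pvBit_natCast, pvNat_bit_xor]
    have h1 := pvNat_bit_le (-a - 1).toNat i
    have h2 := pvNat_bit_le (-b - 1).toNat i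
    set nA := ((-a - 1).toNat >>> i) &&& 1 with hnA
    set nB := ((-b - 1).toNat >>> i) &&& 1 with hnB
    interval_cases nA <;> interval_cases nB <;> decide
theorem pvGetNthBit_eq (a : Int) (j : Nat) : pvGetNthBit a (j : Int) = pvBit a j := by
  unfold pvGetNthBit pvBit
  rw [PySem.Int.band_one, PySem.Int.mod_eq_emod_of_pos (by norm_num), Int.toNat_natCast,
    Int.shiftRight_eq_div_pow]
  push_cast
  rfl

theorem pv_emod_pow_succ (c : Int) (k : Nat) :
    c % 2 ^ (k + 1) = c % 2 ^ k + pvBit c k * 2 ^ k := by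
  have hM : (0:Int) < 2 ^ k := by positivity
  have h1 := Int.ediv_add_emod c (2 ^ k)
  have h2 := Int.emod_nonneg c (ne_of_gt hM)
  have h3 := Int.emod_lt_of_pos c hM
  have h4 := Int.ediv_add_emod (c / 2 ^ k) 2
  have h5 := Int.emod_two_eq (c / 2 ^ k)
  unfold pvBit
  have hc : c = (c / 2 ^ k % 2 * 2 ^ k + c % 2 ^ k) + (2 ^ k * 2) * (c / 2 ^ k / 2) := by
    linear_combination -h1 - (2:Int) ^ k * h4
  rw [show (2:Int) ^ (k + 1) = 2 ^ k * 2 by ring]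
  conv_lhs => rw [hc]
  rw [Int.add_mul_emod_self_left]
  rw [Int.emod_eq_of_lt (by rcases h5 with h | h <;> rw [h] <;> omega)
    (by rcases h5 with h | h <;> rw [h] <;> omega)]
  ring

theorem pvCalculateXor_eq (a b n : Int) :
    pvCalculateXor a b n = PySem.Int.bxor a b % 2 ^ n.toNat := by
  unfold pvCalculateXor
  rw [PySem.List.pyRange_zero]
  induction n.toNat with
  | zero => simp
  | succ k ih =>
    rw [List.range_succ, List.map_append, List.foldl_append, ih]
    simp only [List.map_cons, List.map_nil, List.foldl_cons, List.foldl_nil]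
    rw [pvGetNthBit_eq, pvGetNthBit_eq, pvBit_xor, pv_emod_pow_succ, Int.toNat_natCast]

theorem pv_band_mask (x : Int) (k : Nat) :
    PySem.Int.band x ((2:Int) ^ k - 1) = x % 2 ^ k := by
  have hcast : ((2 ^ k : Nat) : Int) = (2:Int) ^ k := by push_cast; rfl
  have hknat : (0:Nat) < 2 ^ k := by positivity
  have hm : ((2:Int) ^ k - 1).toNat = 2 ^ k - 1 := by omega
  have hmn : (0:Int) ≤ (2:Int) ^ k - 1 := by omega
  by_cases hx : 0 ≤ x
  · unfold PySem.Int.band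
    rw [if_pos hx, if_pos hmn, hm, Nat.and_two_pow_sub_one_eq_mod]
    rw [show x = ((x.toNat : Int)) from (Int.toNat_of_nonneg hx).symm, Int.toNat_natCast]
    push_cast
    rfl
  · unfold PySem.Int.band
    rw [if_neg hx, if_pos hmn, hm]
    rw [Nat.and_comm, Nat.and_two_pow_sub_one_eq_mod]
    have hp : (0:Nat) < 2 ^ k := by positivity
    have h6 := Nat.div_add_mod (-x - 1).toNat (2 ^ k)
    have h7 : (-x - 1).toNat % 2 ^ k < 2 ^ k := Nat.mod_lt _ hp
    have hxe : x = ((2:Int) ^ k) * (-(((-x - 1).toNat / 2 ^ k : Nat) : Int) - 1)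
        + ((2:Int) ^ k - 1 - (((-x - 1).toNat % 2 ^ k : Nat) : Int)) := by
      have hco : ((-x - 1).toNat : Int) = -x - 1 := Int.toNat_of_nonneg (by omega)
      have h6' : ((2:Int) ^ k) * (((-x - 1).toNat / 2 ^ k : Nat) : Int)
          + (((-x - 1).toNat % 2 ^ k : Nat) : Int) = -x - 1 := by
        rw [← hco]
        exact_mod_cast h6
      linear_combination h6'
    conv_rhs => rw [hxe]
    rw [show ((2:Int) ^ k) * (-(((-x - 1).toNat / 2 ^ k : Nat) : Int) - 1)
        + ((2:Int) ^ k - 1 - (((-x - 1).toNat % 2 ^ k : Nat) : Int))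
        = ((2:Int) ^ k - 1 - (((-x - 1).toNat % 2 ^ k : Nat) : Int))
        + 2 ^ k * (-(((-x - 1).toNat / 2 ^ k : Nat) : Int) - 1) by ring]
    rw [Int.add_mul_emod_self_left]
    rw [Int.emod_eq_of_lt (by omega) (by omega)]
    omega
def pvEntry (t : List (List Int)) (i j : Nat) : Int := ((t[i]?).getD []).getD j 0
def pvUpd (t : List (List Int)) (p : Nat × Nat) (c : Int) : List (List Int) :=
  t.modify p.1 (fun row => row.modify p.2 (· + c))

theorem pvRowLen_pvUpd (t : List (List Int)) (p : Nat × Nat) (c : Int) (i : Nat) :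
    (((pvUpd t p c)[i]?).getD []).length = ((t[i]?).getD []).length := by
  unfold pvUpd
  rw [List.getElem?_modify]
  by_cases h : p.1 = i
  · simp [h]
    cases t[i]? <;> simp
  · simp [h]

theorem pvEntry_pvUpd (t : List (List Int)) (p : Nat × Nat) (c : Int) (i j : Nat)
    (hj : j < ((t[i]?).getD []).length) :
    pvEntry (pvUpd t p c) i j = if p = (i, j) then pvEntry t i j + c else pvEntry t i j := by
  unfold pvEntry pvUpd
  rw [List.getElem?_modify]
  by_cases h1 : p.1 = i
  · subst h1
    cases ht : t[p.1]? with
    | none => simp [ht] at hj ⊢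
    | some row =>
      rw [ht] at hj
      simp only [Option.getD_some] at hj
      simp only [Option.map_eq_map, Option.map_some, ite_true, Option.getD_some]
      rw [List.getD_eq_getElem?_getD, List.getD_eq_getElem?_getD, List.getElem?_modify]
      by_cases h2 : p.2 = j
      · subst h2
        rw [if_pos (show p = (p.1, p.2) from rfl)]
        rw [List.getElem?_eq_getElem hj]
        simp
      · simp only [if_neg h2]
        rw [if_neg (by intro hc; apply h2; rw [hc])]
        cases row[j]? <;> simp
  · simp only [if_neg h1]
    rw [if_neg (fun hc => h1 (by rw [hc]))]
    cases t[i]? <;> simp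

theorem pvLen_foldl {α : Type} (L : List α) (g : α → Nat × Nat) (c : Int) (t0 : List (List Int)) :
    (L.foldl (fun t p => pvUpd t (g p) c) t0).length = t0.length := by
  induction L generalizing t0 with
  | nil => rfl
  | cons hd tl ih => rw [List.foldl_cons, ih]; exact List.length_modify ..

theorem pvRowLen_foldl {α : Type} (L : List α) (g : α → Nat × Nat) (c : Int) (t0 : List (List Int)) (i : Nat) :
    (((L.foldl (fun t p => pvUpd t (g p) c) t0)[i]?).getD []).length = ((t0[i]?).getD []).length := by
  induction L generalizing t0 with
  | nil => rfl
  | cons hd tl ih => rw [List.foldl_cons, ih, pvRowLen_pvUpd]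

theorem pvEntry_foldl {α : Type} (L : List α) (g : α → Nat × Nat) (c : Int) (t0 : List (List Int)) (i j : Nat)
    (hj : j < ((t0[i]?).getD []).length) :
    pvEntry (L.foldl (fun t p => pvUpd t (g p) c) t0) i j
      = pvEntry t0 i j + c * (L.countP (fun p => g p = (i, j)) : Int) := by
  induction L generalizing t0 with
  | nil => simp
  | cons hd tl ih =>
    rw [List.foldl_cons, ih _ (by rw [pvRowLen_pvUpd]; exact hj), pvEntry_pvUpd _ _ _ _ _ hj,
      List.countP_cons]
    by_cases h : g hd = (i, j)
    · rw [if_pos h, if_pos (by simp [h])]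
      push_cast
      ring
    · rw [if_neg h, if_neg (by simpa using h)]
      push_cast
      ring

def pvF (s : List Int) (k : Nat) (x y : Nat) : Nat :=
  ((PySem.Int.bxor (s.getD x 0) (s.getD y 0)) % (2:Int) ^ k).toNat

theorem pvF_comm (s : List Int) (k x y : Nat) : pvF s k x y = pvF s k y x := by
  unfold pvF; rw [PySem.Int.bxor_comm]

theorem pvCombos2_pairwise (l : List Nat) (h : l.Pairwise (· < ·)) :
    PySem.List.combinations l 2 =
      l.flatMap (fun x => (l.filter (fun y => x < y)).map (fun y => [x, y])) := by
  induction l with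
  | nil => rfl
  | cons x xs ih =>
    rcases List.pairwise_cons.1 h with ⟨hx, hxs⟩
    rw [show (2:Nat) = 1 + 1 from rfl, PySem.List.combinations_cons_succ,
      PySem.List.combinations_one, List.flatMap_cons, ih hxs]
    congr 1
    · rw [List.map_map, List.filter_cons_of_neg (by simp)]
      rw [List.filter_eq_self.2 (by intro y hy; simpa using hx y hy)]
      rfl
    · apply List.flatMap_congr
      intro t ht
      rw [List.filter_cons_of_neg (by simp; exact Nat.le_of_lt (hx t ht))]

theorem pvCountP_split (l : List Nat) (p q : Nat → Bool) :
    l.countP (fun a => p a && q a) + l.countP (fun a => p a && !q a) = l.countP p := by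
  have h1 : l.countP (fun a => p a && q a) = (l.filter p).countP q := by
    rw [List.countP_filter]; exact List.countP_congr (by intro a _; simp [Bool.and_comm])
  have h2 : l.countP (fun a => p a && !q a) = (l.filter p).countP (fun a => !q a) := by
    rw [List.countP_filter]; exact List.countP_congr (by intro a _; simp [Bool.and_comm])
  rw [h1, h2, List.countP_eq_length_filter, List.countP_eq_length_filter,
    List.countP_eq_length_filter, ← List.length_eq_length_filter_add]

theorem pvInner (s : List Int) (k m x i j : Nat) (hm : m = 2 ^ k) (hx : x < m) (him : i < m) :
    ((List.range m).filter (fun y => x < y)).countP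
        (fun y => decide (((x ^^^ y) % m, pvF s k x y) = (i, j)))
      = if x < x ^^^ i ∧ pvF s k x (x ^^^ i) = j then 1 else 0 := by
  have hxi : x ^^^ i < m := hm ▸ Nat.xor_lt_two_pow (hm ▸ hx) (hm ▸ him)
  by_cases hP : pvF s k x (x ^^^ i) = j
  · have hc : ((List.range m).filter (fun y => x < y)).countP
        (fun y => decide (((x ^^^ y) % m, pvF s k x y) = (i, j)))
        = ((List.range m).filter (fun y => x < y)).countP (fun y => y == x ^^^ i) := by
      apply List.countP_congr
      intro y hy
      have hym : y < m := List.mem_range.1 (List.mem_of_mem_filter hy)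
      have hxym : x ^^^ y < m := hm ▸ Nat.xor_lt_two_pow (hm ▸ hx) (hm ▸ hym)
      simp only [decide_eq_true_eq, Prod.mk.injEq, beq_iff_eq]
      constructor
      · rintro ⟨h1, _⟩
        rw [Nat.mod_eq_of_lt hxym] at h1
        rw [← h1, Nat.xor_xor_cancel_left]
      · rintro rfl
        refine ⟨?_, hP⟩
        rw [Nat.xor_xor_cancel_left]
        exact Nat.mod_eq_of_lt him
    rw [hc]
    by_cases hlt : x < x ^^^ i
    · rw [if_pos ⟨hlt, hP⟩]
      exact List.count_eq_one_of_mem ((List.nodup_range).filter _)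
        (List.mem_filter.2 ⟨List.mem_range.2 hxi, by simpa using hlt⟩)
    · rw [if_neg (by tauto)]
      exact List.count_eq_zero_of_not_mem
        (fun hmem => hlt (by simpa using (List.mem_filter.1 hmem).2))
  · rw [if_neg (by tauto)]
    rw [List.countP_eq_zero.2]
    intro y hy
    have hym : y < m := List.mem_range.1 (List.mem_of_mem_filter hy)
    have hxym : x ^^^ y < m := hm ▸ Nat.xor_lt_two_pow (hm ▸ hx) (hm ▸ hym)
    simp only [decide_eq_true_eq, Prod.mk.injEq, not_and]
    intro h1
    rw [Nat.mod_eq_of_lt hxym] at h1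
    have hy2 : y = x ^^^ i := by rw [← h1, Nat.xor_xor_cancel_left]
    subst hy2
    exact hP

theorem pvCountA (s : List Int) (k m i j : Nat) (hm : m = 2 ^ k) (him : i < m)
    (P : List Nat → Bool)
    (hP : ∀ x y, x < m → y < m →
      P [x, y] = decide (((x ^^^ y) % m, pvF s k x y) = (i, j))) :
    (PySem.List.combinations (List.range m) 2).countP P
      = (List.range m).countP (fun x => decide (x < x ^^^ i ∧ pvF s k x (x ^^^ i) = j)) := by
  rw [pvCombos2_pairwise _ List.pairwise_lt_range, List.countP_flatMap]
  rw [List.map_congr_left (g := fun x => if x < x ^^^ i ∧ pvF s k x (x ^^^ i) = j then 1 else 0)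
    (by
      intro x hxm
      have hx : x < m := List.mem_range.1 hxm
      rw [Function.comp_apply, List.countP_map]
      rw [List.countP_congr (q := fun y => decide (((x ^^^ y) % m, pvF s k x y) = (i, j)))
        (by
          intro y hy
          have hym : y < m := List.mem_range.1 (List.mem_of_mem_filter hy)
          rw [Function.comp_apply, hP x y hx hym])]
      exact pvInner s k m x i j hm hx him)]
  rw [show (fun x => if x < x ^^^ i ∧ pvF s k x (x ^^^ i) = j then 1 else 0)
      = (fun x => if (fun x => decide (x < x ^^^ i ∧ pvF s k x (x ^^^ i) = j)) x then 1 else 0) by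
    funext x; simp]
  exact PySem.List.sum_map_ite_one_zero_nat _ _

theorem pvFlip (s : List Int) (k m i j : Nat) (hm : m = 2 ^ k) (him : i < m) :
    (List.range m).countP (fun x => decide (pvF s k x (x ^^^ i) = j ∧ ¬ x < x ^^^ i ∧ ¬ x ^^^ i = x))
      = (List.range m).countP (fun x => decide (x < x ^^^ i ∧ pvF s k x (x ^^^ i) = j)) := by
  have hperm : ((List.range m).map (fun x => x ^^^ i)).Perm (List.range m) := by
    refine (List.perm_ext_iff_of_nodup
      (List.nodup_range.map (fun a b h => Nat.xor_left_inj.mp h)) List.nodup_range).2 ?_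
    intro y
    simp only [List.mem_map, List.mem_range]
    constructor
    · rintro ⟨x, hx, rfl⟩
      exact hm ▸ Nat.xor_lt_two_pow (hm ▸ hx) (hm ▸ him)
    · intro hy
      exact ⟨y ^^^ i, hm ▸ Nat.xor_lt_two_pow (hm ▸ hy) (hm ▸ him), Nat.xor_xor_cancel_right y i⟩
  calc (List.range m).countP (fun x => decide (pvF s k x (x ^^^ i) = j ∧ ¬ x < x ^^^ i ∧ ¬ x ^^^ i = x))
      = ((List.range m).map (fun x => x ^^^ i)).countP
          (fun x => decide (pvF s k x (x ^^^ i) = j ∧ ¬ x < x ^^^ i ∧ ¬ x ^^^ i = x)) :=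
        (hperm.countP_eq _).symm
    _ = (List.range m).countP ((fun x => decide (pvF s k x (x ^^^ i) = j ∧ ¬ x < x ^^^ i ∧ ¬ x ^^^ i = x))
          ∘ (fun x => x ^^^ i)) := List.countP_map
    _ = (List.range m).countP (fun x => decide (x < x ^^^ i ∧ pvF s k x (x ^^^ i) = j)) := by
        apply List.countP_congr
        intro x _
        simp only [Function.comp_apply, Nat.xor_xor_cancel_right, decide_eq_true_eq]
        rw [pvF_comm]
        constructor
        · rintro ⟨h1, h2, h3⟩
          exact ⟨by omega, h1⟩
        · rintro ⟨h1, h2⟩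
          exact ⟨h2, by omega, by omega⟩

theorem pvCountB (s : List Int) (k m i j : Nat) (hm : m = 2 ^ k) (him : i < m)
    (Q : Nat × Nat → Bool)
    (hQ : ∀ t x, t < m - 1 → x < m →
      Q (t, x) = decide ((1 + t, pvF s k x (x ^^^ (1 + t))) = (i, j))) :
    ((List.range (m - 1)).flatMap (fun t => (List.range m).map (fun x => (t, x)))).countP Q
      = (if 1 ≤ i then 1 else 0) * (List.range m).countP (fun x => decide (pvF s k x (x ^^^ i) = j)) := by
  rw [List.countP_flatMap]
  rw [List.map_congr_left (g := fun t =>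
      (List.range m).countP (fun x => decide (pvF s k x (x ^^^ i) = j)) * (if (fun t => decide (1 + t = i)) t then 1 else 0))
    (by
      intro t htm
      have ht : t < m - 1 := List.mem_range.1 htm
      rw [Function.comp_apply, List.countP_map]
      by_cases hti : 1 + t = i
      · simp only [hti, decide_true, if_pos, mul_one]
        apply List.countP_congr
        intro x hx
        have hxm : x < m := List.mem_range.1 hx
        rw [Function.comp_apply, hQ t x ht hxm, hti]
        simp
      · simp only [hti, decide_false, if_neg, Bool.false_eq_true, not_false_iff, mul_zero]
        rw [List.countP_eq_zero.2]
        intro x hx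
        have hxm : x < m := List.mem_range.1 (hx)
        rw [Function.comp_apply, hQ t x ht hxm]
        simp only [decide_eq_true_eq, Prod.mk.injEq, not_and]
        intro h
        exact absurd h hti)]
  rw [List.sum_map_mul_left, PySem.List.sum_map_ite_one_zero_nat]
  by_cases hi : 1 ≤ i
  · have hcnt : (List.range (m - 1)).countP (fun t => decide (1 + t = i)) = 1 := by
      rw [List.countP_congr (q := fun t => t == i - 1) (by intro t _; simp; omega)]
      show List.count (i - 1) _ = 1
      rw [List.count_range, if_pos (by omega)]
    rw [hcnt, mul_one, if_pos hi, one_mul]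
  · have hcnt : (List.range (m - 1)).countP (fun t => decide (1 + t = i)) = 0 :=
      List.countP_eq_zero.2 (by intro t _; simp; omega)
    rw [hcnt, mul_zero, if_neg hi, zero_mul]

theorem pvXorEqSelf (x i : Nat) (h : x ^^^ i = x) : i = 0 := by
  have h2 := Nat.xor_xor_cancel_left x i
  rw [h, Nat.xor_self] at h2
  exact h2.symm

theorem pvCountEq (s : List Int) (k m i j : Nat) (hm : m = 2 ^ k) (him : i < m)
    (P : List Nat → Bool)
    (hP : ∀ x y, x < m → y < m →
      P [x, y] = decide (((x ^^^ y) % m, pvF s k x y) = (i, j)))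
    (Q : Nat × Nat → Bool)
    (hQ : ∀ t x, t < m - 1 → x < m →
      Q (t, x) = decide ((1 + t, pvF s k x (x ^^^ (1 + t))) = (i, j))) :
    ((List.range (m - 1)).flatMap (fun t => (List.range m).map (fun x => (t, x)))).countP Q
      = 2 * (PySem.List.combinations (List.range m) 2).countP P := by
  rw [pvCountA s k m i j hm him P hP, pvCountB s k m i j hm him Q hQ]
  by_cases hi : 1 ≤ i
  · rw [if_pos hi, one_mul]
    have hsplit := pvCountP_split (List.range m)
      (fun x => decide (pvF s k x (x ^^^ i) = j)) (fun x => decide (x < x ^^^ i))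
    have e1 : (List.range m).countP
        (fun a => decide (pvF s k a (a ^^^ i) = j) && decide (a < a ^^^ i))
        = (List.range m).countP (fun x => decide (x < x ^^^ i ∧ pvF s k x (x ^^^ i) = j)) := by
      apply List.countP_congr; intro x _
      simp only [Bool.and_eq_true, decide_eq_true_eq]
      tauto
    have e2 : (List.range m).countP
        (fun a => decide (pvF s k a (a ^^^ i) = j) && !decide (a < a ^^^ i))
        = (List.range m).countP
          (fun x => decide (pvF s k x (x ^^^ i) = j ∧ ¬ x < x ^^^ i ∧ ¬ x ^^^ i = x)) := by
      apply List.countP_congr; intro x _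
      simp only [Bool.and_eq_true, Bool.not_eq_true', decide_eq_true_eq, decide_eq_false_iff_not]
      constructor
      · rintro ⟨h1, h2⟩
        exact ⟨h1, h2, fun hc => by have := pvXorEqSelf x i hc; omega⟩
      · rintro ⟨h1, h2, _⟩
        exact ⟨h1, h2⟩
    rw [e1, e2, pvFlip s k m i j hm him] at hsplit
    omega
  · have hi0 : i = 0 := by omega
    subst hi0
    rw [if_neg hi, zero_mul]
    have : (List.range m).countP (fun x => decide (x < x ^^^ 0 ∧ pvF s k x (x ^^^ 0) = j)) = 0 := by
      apply List.countP_eq_zero.2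
      intro x _
      simp [Nat.xor_zero]
    rw [this]
    rfl

def pvFinal (table : List (List Int)) : Int :=
  (PySem.List.max? (table.map (fun row => (PySem.List.max? row (fun v => v)).getD 0)) (fun v => v)).getD 0

def pvGA (n : Int) (s : List Int) (c : List Int) : Nat × Nat :=
  ((pvCalculateXor ((PySem.List.pyGet? c 0).getD 0) ((PySem.List.pyGet? c 1).getD 0) n).toNat,
   (pvCalculateXor ((PySem.List.pyGet? s ((PySem.List.pyGet? c 0).getD 0)).getD 0)
      ((PySem.List.pyGet? s ((PySem.List.pyGet? c 1).getD 0)).getD 0) n).toNat)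

def pvGB (n : Int) (s : List Int) (p : Int × Int) : Nat × Nat :=
  (p.1.toNat,
   (PySem.Int.band
      (PySem.Int.bxor ((PySem.List.pyGet? s p.2).getD 0)
        ((PySem.List.pyGet? s (PySem.Int.bxor p.2 p.1)).getD 0)) (2 ^ n.toNat - 1)).toNat)

theorem pvPortA_eq (n : Int) (s : List Int) :
    calculate_xor_profile n s
      = pvFinal ((PySem.List.combinations (PySem.List.pyRange 0 ((2:Int) ^ n.toNat) 1) 2).foldl
          (fun t c => pvUpd t (pvGA n s c) 2)
          ((PySem.List.pyRange 0 ((2:Int) ^ n.toNat) 1).map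
            (fun _ => (PySem.List.pyRange 0 ((2:Int) ^ n.toNat) 1).map (fun _ => (0:Int))))) := rfl

theorem pvPortB_eq (n : Int) (s : List Int) :
    calculate_xor_profile_alt n s
      = pvFinal ((((PySem.List.pyRange 1 ((2:Int) ^ n.toNat) 1)).flatMap
            (fun dx => (PySem.List.pyRange 0 ((2:Int) ^ n.toNat) 1).map (fun x => (dx, x)))).foldl
          (fun t p => pvUpd t (pvGB n s p) 1)
          ((PySem.List.pyRange 0 ((2:Int) ^ n.toNat) 1).map
            (fun _ => PySem.List.pyRepeat [(0:Int)] ((2:Int) ^ n.toNat)))) := by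
  rw [List.foldl_flatMap]
  simp only [List.foldl_map]
  rfl

theorem pvGA_pair (n : Int) (s : List Int) (x y : Nat) :
    pvGA n s [(x : Int), (y : Int)] = ((x ^^^ y) % 2 ^ n.toNat, pvF s n.toNat x y) := by
  unfold pvGA pvF
  simp only [PySem.List.pyGet?_zero_cons, Option.getD_some]
  have h1 : (PySem.List.pyGet? [(x : Int), (y : Int)] 1).getD 0 = (y : Int) := by
    simp [PySem.List.pyGet?, PySem.List.pyIdx?]
  rw [h1, pvCalculateXor_eq, pvCalculateXor_eq, PySem.Int.bxor_natCast,
    PySem.List.pyGet?_natCast, PySem.List.pyGet?_natCast]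
  have hfst : (((x ^^^ y : Nat) : Int) % (2:Int) ^ n.toNat).toNat = (x ^^^ y) % 2 ^ n.toNat := by
    rw [show ((x ^^^ y : Nat) : Int) % (2:Int) ^ n.toNat
        = (((x ^^^ y) % 2 ^ n.toNat : Nat) : Int) by push_cast; rfl, Int.toNat_natCast]
  simp only [Prod.mk.injEq]
  refine ⟨hfst, ?_⟩
  rfl

theorem pvGB_pair (n : Int) (s : List Int) (t x : Nat) :
    pvGB n s ((1 + t : Int), (x : Int)) = (1 + t, pvF s n.toNat x (x ^^^ (1 + t))) := by
  unfold pvGB pvF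
  simp only
  rw [show ((1 + t : Int)) = ((1 + t : Nat) : Int) by push_cast; ring]
  rw [PySem.Int.bxor_natCast, pv_band_mask, PySem.List.pyGet?_natCast, PySem.List.pyGet?_natCast,
    Int.toNat_natCast]
  simp

theorem pvEntry_zero (t : List (List Int)) (h : ∀ r ∈ t, ∀ v ∈ r, v = 0) (i j : Nat) :
    pvEntry t i j = 0 := by
  unfold pvEntry
  cases ht : t[i]? with
  | none => rfl
  | some row =>
    simp only [Option.getD_some]
    rw [List.getD_eq_getElem?_getD]
    cases hr : row[j]? with
    | none => rfl
    | some v =>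
      simp only [Option.getD_some]
      exact h row (List.mem_of_getElem? ht) v (List.mem_of_getElem? hr)

theorem pvEntry_getElem (t : List (List Int)) (i j : Nat) (hi : i < t.length)
    (hj : j < (t[i]).length) : t[i][j] = pvEntry t i j := by
  unfold pvEntry
  rw [List.getElem?_eq_getElem hi]
  simp only [Option.getD_some]
  rw [List.getD_eq_getElem?_getD, List.getElem?_eq_getElem hj]
  rfl

theorem pvRowLen_getD (t : List (List Int)) (i : Nat) (hi : i < t.length) :
    ((t[i]?).getD []).length = (t[i]).length := by
  rw [List.getElem?_eq_getElem hi]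
  rfl

theorem pv_main (n : Int) (s : List Int) :
    calculate_xor_profile n s = calculate_xor_profile_alt n s := by
  rw [pvPortA_eq, pvPortB_eq]
  apply congrArg pvFinal
  set k := n.toNat with hk
  set m : Nat := 2 ^ k with hmdef
  have hsize : ((2:Int) ^ k) = ((m : Nat) : Int) := by rw [hmdef]; push_cast; rfl
  have hsizetoNat : ((2:Int) ^ k).toNat = m := by rw [hsize, Int.toNat_natCast]
  have hr0 : PySem.List.pyRange 0 ((2:Int) ^ k) 1 = (List.range m).map (fun x : Nat => (x : Int)) := by
    rw [PySem.List.pyRange_zero, hsizetoNat]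
  have hr1 : PySem.List.pyRange 1 ((2:Int) ^ k) 1
      = (List.range (m - 1)).map (fun t : Nat => ((1 : Int) + (t : Int))) := by
    have h21 : ((2:Int) ^ k - 1).toNat = m - 1 := by rw [hsize]; omega
    rw [PySem.List.pyRange_one, h21]
  -- rewrite the combination list and the difference/point list through the Nat casts
  rw [hr0, hr1, PySem.List.combinations_map, List.foldl_map, List.flatMap_map]
  have hLB : (List.range (m - 1)).flatMap
        (fun t : Nat => ((List.range m).map (fun x : Nat => (x : Int))).map
          (fun x => (((1 : Int) + (t : Int)), x)))
      = ((List.range (m - 1)).flatMap (fun t => (List.range m).map (fun x => (t, x)))).map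
          (fun p : Nat × Nat => (((1 : Int) + (p.1 : Int)), (p.2 : Int))) := by
    rw [List.map_flatMap]
    apply List.flatMap_congr
    intro t _
    rw [List.map_map, List.map_map]
    rfl
  rw [hLB, List.foldl_map]
  -- the two zero tables
  set t0A : List (List Int) := ((List.range m).map (fun x : Nat => (x : Int))).map
      (fun _ => ((List.range m).map (fun x : Nat => (x : Int))).map (fun _ => (0:Int))) with ht0A
  set t0B : List (List Int) := ((List.range m).map (fun x : Nat => (x : Int))).map
      (fun _ => PySem.List.pyRepeat [(0:Int)] ((2:Int) ^ k)) with ht0B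
  have hlenA : t0A.length = m := by simp [ht0A]
  have hlenB : t0B.length = m := by simp [ht0B]
  have hrA' : ∀ r ∈ t0A, r.length = m := by
    intro r hr
    rcases List.mem_map.1 (ht0A ▸ hr) with ⟨_, _, rfl⟩
    simp
  have hrB' : ∀ r ∈ t0B, r.length = m := by
    intro r hr
    rcases List.mem_map.1 (ht0B ▸ hr) with ⟨_, _, rfl⟩
    rw [PySem.List.pyRepeat_singleton, List.length_replicate, hsizetoNat]
  have hrowA : ∀ i, i < m → ((t0A[i]?).getD []).length = m := by
    intro i hi
    rw [pvRowLen_getD t0A i (by omega)]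
    exact hrA' _ (List.getElem_mem _)
  have hrowB : ∀ i, i < m → ((t0B[i]?).getD []).length = m := by
    intro i hi
    rw [pvRowLen_getD t0B i (by omega)]
    exact hrB' _ (List.getElem_mem _)
  have hzA : ∀ i j, pvEntry t0A i j = 0 := by
    intro i j
    apply pvEntry_zero
    intro r hr v hv
    rw [ht0A] at hr
    rcases List.mem_map.1 hr with ⟨_, _, rfl⟩
    rcases List.mem_map.1 hv with ⟨_, _, rfl⟩
    rfl
  have hzB : ∀ i j, pvEntry t0B i j = 0 := by
    intro i j
    apply pvEntry_zero
    intro r hr v hv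
    rw [ht0B] at hr
    rcases List.mem_map.1 hr with ⟨_, _, rfl⟩
    rw [PySem.List.pyRepeat_singleton] at hv
    exact List.eq_of_mem_replicate hv
  -- entry-wise equality of the two folds
  apply List.ext_getElem
  · rw [pvLen_foldl, pvLen_foldl, hlenA, hlenB]
  intro i hA hB
  rw [pvLen_foldl, hlenA] at hA
  rw [pvLen_foldl, hlenB] at hB
  apply List.ext_getElem
  · rw [← pvRowLen_getD _ i (by rw [pvLen_foldl, hlenA]; exact hA),
      ← pvRowLen_getD _ i (by rw [pvLen_foldl, hlenB]; exact hB),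
      pvRowLen_foldl, pvRowLen_foldl, hrowA i hA, hrowB i hB]
  intro j hjA hjB
  have hjm : j < m := by
    rw [← pvRowLen_getD _ i (by rw [pvLen_foldl, hlenA]; exact hA),
      pvRowLen_foldl, hrowA i hA] at hjA
    exact hjA
  rw [pvEntry_getElem _ i j _ hjA, pvEntry_getElem _ i j _ hjB,
    pvEntry_foldl _ _ _ _ i j (by rw [hrowA i hA]; exact hjm),
    pvEntry_foldl _ _ _ _ i j (by rw [hrowB i hB]; exact hjm),
    hzA i j, hzB i j]
  have hcnt := pvCountEq s k m i j hmdef hA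
    (fun c => decide (pvGA n s (List.map (fun x : Nat => (x : Int)) c) = (i, j)))
    (by
      intro x y hx hy
      show decide (pvGA n s (List.map (fun z : Nat => (z : Int)) [x, y]) = (i, j)) = _
      rw [show List.map (fun z : Nat => (z : Int)) [x, y] = [(x : Int), (y : Int)] by simp,
        pvGA_pair, hmdef])
    (fun p => decide (pvGB n s (((1 : Int) + (p.1 : Int)), (p.2 : Int)) = (i, j)))
    (by
      intro t x ht hx
      show decide (pvGB n s (((1 : Int) + (t : Int)), (x : Int)) = (i, j)) = _
      rw [pvGB_pair])
  rw [hcnt]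
  push_cast
  ring

-- ===== VERDICT (by name: the statement is the Claim_ definition above) =====
theorem calculate_xor_profile_spec : Claim_equal_calculate_xor_profile := by
  intro amount_of_arguments values_from_sbox _ _
  unfold Spec_calculate_xor_profile
  exact pv_main amount_of_arguments values_from_sbox
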